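-- pv_equiv track=rewrite | github.com/ninghaomiao2002/Python-Exercises | Hash Map.py | hashMap
-- ===== SOURCE A (Python) =====
-- def hashMap(queryType, query):
--     hashmap = {}
--     result_sum = 0
--
--     for i in range(len(queryType)):
--
--         if queryType[i] == "insert":
--             x, y = query[i]
--             hashmap[x] = y
--
--         elif queryType[i] == "get":
--             x = query[i][0]
--             if x in hashmap:
--                 result_sum += hashmap[x]
--         elif queryType[i] == "addToKey":
--             x = query[i][0]
--             new_hashmap = {}
--             for key in hashmap:
--                 new_key = key + x
--                 new_hashmap[new_key] = hashmap[key]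
--             hashmap = new_hashmap
--         elif queryType[i] == "addToValue":
--             y = query[i][0]
--             new_hashmap = {}
--             for key in hashmap:
--                 new_hashmap[key] = hashmap[key] + y
--             hashmap = new_hashmap
--     return result_sum
-- ===== SOURCE B (Python) =====
-- def hashMap(queryType, query):
--     # Lazy global offsets: addToKey/addToValue just bump an offset in O(1)
--     # instead of rebuilding the whole dict; keys/values are stored normalized.
--     store = {}
--     key_off = 0
--     val_off = 0
--     total = 0
--     for t, q in zip(queryType, query):
--         if t == "insert":
--             x, y = q
--             store[x - key_off] = y - val_off
--         elif t == "get":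
--             v = store.get(q[0] - key_off)
--             if v is not None:
--                 total += v + val_off
--         elif t == "addToKey":
--             key_off += q[0]
--         elif t == "addToValue":
--             val_off += q[0]
--     return total
-- ===== Notes on version B (the rewrite author's own statement) =====
-- stated objective: faster
-- what changed: Instead of rebuilding the whole dict on every addToKey/addToValue, B keeps two lazy global offsets (key_off, val_off), stores entries normalized at insert and de-normalizes at get, making every query O(1).
import Mathlib
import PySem

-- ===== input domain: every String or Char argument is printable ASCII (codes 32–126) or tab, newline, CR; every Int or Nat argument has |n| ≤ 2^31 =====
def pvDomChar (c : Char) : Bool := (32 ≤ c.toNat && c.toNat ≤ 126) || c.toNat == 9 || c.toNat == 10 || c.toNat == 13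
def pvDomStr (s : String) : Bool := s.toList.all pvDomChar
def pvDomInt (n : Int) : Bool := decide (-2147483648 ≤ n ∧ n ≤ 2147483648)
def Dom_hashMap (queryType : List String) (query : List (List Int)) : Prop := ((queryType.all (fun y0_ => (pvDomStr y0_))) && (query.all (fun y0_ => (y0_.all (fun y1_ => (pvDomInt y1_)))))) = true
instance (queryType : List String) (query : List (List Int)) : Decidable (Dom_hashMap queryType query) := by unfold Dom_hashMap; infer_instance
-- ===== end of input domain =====

-- B replaces A's full dict rebuild on addToKey/addToValue by two lazy global
-- offsets applied at insert/get; objective: faster (O(Q) instead of O(Q*N)).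

-- ===== PORT A =====
-- one query step of A: state = (hashmap, result_sum)
def hashMapStepA (st : PySem.Dict Int Int × Int) (t : String) (q : List Int) :
    PySem.Dict Int Int × Int :=
  if t = "insert" then
    match q with
    | [x, y] => (st.1.insert x y, st.2)
    | _ => st
  else if t = "get" then
    match q with
    | x :: _ => if st.1.contains x then (st.1, st.2 + st.1.getD x 0) else st
    | [] => st
  else if t = "addToKey" then
    match q with
    | x :: _ => (st.1.items.foldl (fun nd p => nd.insert (p.1 + x) p.2) PySem.Dict.empty, st.2)
    | [] => st
  else if t = "addToValue" then
    match q with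
    | y :: _ => (st.1.items.foldl (fun nd p => nd.insert p.1 (p.2 + y)) PySem.Dict.empty, st.2)
    | [] => st
  else st

def hashMap (queryType : List String) (query : List (List Int)) : Int :=
  ((List.zip queryType query).foldl (fun st p => hashMapStepA st p.1 p.2)
    (PySem.Dict.empty, 0)).2

-- ===== PORT B =====
-- Source B's loop over zip(queryType, query), written as the obvious tail
-- recursion on both lists with the loop variables (store, key_off, val_off,
-- total) carried as accumulator arguments.
def hashMapGo : List String → List (List Int) →
    PySem.Dict Int Int → Int → Int → Int → Int
  | [], _, _, _, _, total => total
  | _ :: _, [], _, _, _, total => total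
  | t :: ts, q :: qs, store, keyOff, valOff, total =>
    if t = "insert" then
      match q with
      | [x, y] => hashMapGo ts qs (store.insert (x - keyOff) (y - valOff)) keyOff valOff total
      | _ => hashMapGo ts qs store keyOff valOff total
    else if t = "get" then
      match q with
      | x :: _ =>
        match store.get? (x - keyOff) with
        | some v => hashMapGo ts qs store keyOff valOff (total + (v + valOff))
        | none => hashMapGo ts qs store keyOff valOff total
      | [] => hashMapGo ts qs store keyOff valOff total
    else if t = "addToKey" then
      match q with
      | x :: _ => hashMapGo ts qs store (keyOff + x) valOff total
      | [] => hashMapGo ts qs store keyOff valOff total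
    else if t = "addToValue" then
      match q with
      | y :: _ => hashMapGo ts qs store keyOff (valOff + y) total
      | [] => hashMapGo ts qs store keyOff valOff total
    else hashMapGo ts qs store keyOff valOff total

def hashMap_alt (queryType : List String) (query : List (List Int)) : Int :=
  hashMapGo queryType query PySem.Dict.empty 0 0 0

-- ===== PRECONDITION & SPEC =====
-- Pre_ excludes exactly the inputs where Python A raises: a recognized query
-- type at an index i with no query[i] (IndexError), an "insert" whose query row
-- is not a pair (unpacking raises), or a get/addToKey/addToValue with an empty
-- query row (IndexError); rows at unrecognized query types are never touched.
def Pre_hashMap (queryType : List String) (query : List (List Int)) : Prop :=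
  ∀ i < queryType.length,
    (queryType[i]? = some "insert" →
      i < query.length ∧ (query[i]?.getD []).length = 2) ∧
    ((queryType[i]? = some "get" ∨ queryType[i]? = some "addToKey" ∨
        queryType[i]? = some "addToValue") →
      i < query.length ∧ query[i]?.getD [] ≠ [])
instance (queryType : List String) (query : List (List Int)) :
    Decidable (Pre_hashMap queryType query) := by unfold Pre_hashMap; infer_instance

def pvWitness_hashMap : List String × List (List Int) :=
  (["insert", "addToKey", "get"], [[1, 2], [3], [4]])

def Spec_hashMap (queryType : List String) (query : List (List Int)) (out : Int) : Prop := out = hashMap_alt queryType query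
instance (queryType : List String) (query : List (List Int)) (out : Int) : Decidable (Spec_hashMap queryType query out) := by unfold Spec_hashMap; infer_instance

-- ===== CLAIM (what is proved, stated in full; the proofs are below) =====
def Claim_equal_hashMap : Prop := ∀ (queryType : List String) (query : List (List Int)), Dom_hashMap queryType query → Pre_hashMap queryType query → Spec_hashMap queryType query (hashMap queryType query)

-- ===== LEMMAS AND PROOFS =====

-- The coupling invariant: A's dict is B's dict with both offsets applied.
def hmRel (d e : PySem.Dict Int Int) (ko vo : Int) : Prop :=
  d.keys.Nodup ∧ e.keys.Nodup ∧
  d.items = e.items.map (fun p => (p.1 + ko, p.2 + vo))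

lemma hmRel_keys {d e : PySem.Dict Int Int} {ko vo : Int} (h : hmRel d e ko vo) :
    d.keys = e.keys.map (fun k => k + ko) := by
  have := h.2.2
  simp only [PySem.Dict.keys, this, List.map_map]
  rfl

lemma hmRel_mem_keys {d e : PySem.Dict Int Int} {ko vo : Int} (h : hmRel d e ko vo)
    (x : Int) : x ∈ d.keys ↔ (x - ko) ∈ e.keys := by
  rw [hmRel_keys h]
  constructor
  · rintro hm
    rcases List.mem_map.1 hm with ⟨k, hk, rfl⟩
    simpa using hk
  · intro hm
    exact List.mem_map.2 ⟨x - ko, hm, by ring⟩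

lemma hmRel_get? {d e : PySem.Dict Int Int} {ko vo : Int} (h : hmRel d e ko vo)
    (x : Int) : d.get? x = (e.get? (x - ko)).map (· + vo) := by
  cases hg : e.get? (x - ko) with
  | some v =>
      have hmem : (x - ko, v) ∈ e.items := PySem.Dict.mem_items_of_get?_eq_some e hg
      have hd : (x, v + vo) ∈ d.items := by
        rw [h.2.2]
        refine List.mem_map.2 ⟨(x - ko, v), hmem, ?_⟩
        simp
      simpa using PySem.Dict.get?_of_mem_items d hd h.1
  | none =>
      have hx : x ∉ d.keys := by
        rw [hmRel_mem_keys h]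
        exact (PySem.Dict.get?_eq_none_iff_not_mem_keys e (x - ko)).1 hg
      simpa using (PySem.Dict.get?_eq_none_iff_not_mem_keys d x).2 hx

lemma hmRel_contains {d e : PySem.Dict Int Int} {ko vo : Int} (h : hmRel d e ko vo)
    (x : Int) : d.contains x = e.contains (x - ko) := by
  rw [PySem.Dict.contains_eq_isSome_get?, PySem.Dict.contains_eq_isSome_get?,
      hmRel_get? h]
  cases e.get? (x - ko) <;> rfl

-- rebuilding with shifted keys/values, as A does, yields the mapped items list
lemma rebuild_items_key (d : PySem.Dict Int Int) (x : Int) (hnd : d.keys.Nodup) :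
    (d.items.foldl (fun nd p => nd.insert (p.1 + x) p.2) PySem.Dict.empty).items
      = d.items.map (fun p => (p.1 + x, p.2)) := by
  have h := PySem.Dict.items_foldl_insert_fresh d.items
    (fun p => p.1 + x) (fun p => p.2) PySem.Dict.empty
    (by intro a _; simp)
    (by
      have he : d.items.map (fun p => p.1 + x) = d.keys.map (fun k => k + x) := by
        simp only [PySem.Dict.keys, List.map_map]; rfl
      rw [he]
      exact hnd.map (add_left_injective x))
  simpa using h

lemma rebuild_items_val (d : PySem.Dict Int Int) (y : Int) (hnd : d.keys.Nodup) :
    (d.items.foldl (fun nd p => nd.insert p.1 (p.2 + y)) PySem.Dict.empty).items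
      = d.items.map (fun p => (p.1, p.2 + y)) := by
  have h := PySem.Dict.items_foldl_insert_fresh d.items
    (fun p => p.1) (fun p => p.2 + y) PySem.Dict.empty
    (by intro a _; simp)
    (by simpa [PySem.Dict.keys] using hnd)
  simpa using h

lemma nodup_of_items_map {d : PySem.Dict Int Int} {l : List (Int × Int)}
    (f : Int → Int) (g : Int × Int → Int) (hinj : Function.Injective f)
    (h : d.items = l.map (fun p => (f p.1, g p)))
    (hnd : (l.map (·.1)).Nodup) : d.keys.Nodup := by
  have hk : d.keys = (l.map (·.1)).map f := by
    simp only [PySem.Dict.keys, h, List.map_map]; rfl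
  rw [hk]
  exact hnd.map hinj

-- the whole loop: A's foldl over the zipped queries, against B's tail
-- recursion, related by the invariant
lemma hm_loop : ∀ (ts : List String) (qs : List (List Int))
    (d e : PySem.Dict Int Int) (ko vo s : Int), hmRel d e ko vo →
    ((ts.zip qs).foldl (fun st p => hashMapStepA st p.1 p.2) (d, s)).2
      = hashMapGo ts qs e ko vo s := by
  intro ts
  induction ts with
  | nil => intro qs d e ko vo s _; cases qs <;> rfl
  | cons t ts ih =>
    intro qs d e ko vo s h
    cases qs with
    | nil => rfl
    | cons q qs =>
      obtain ⟨hnd, hne, hitems⟩ := h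
      simp only [List.zip_cons_cons, List.foldl_cons]
      show ((ts.zip qs).foldl (fun st p => hashMapStepA st p.1 p.2)
              (hashMapStepA (d, s) t q)).2 = _
      unfold hashMapStepA hashMapGo
      by_cases h1 : t = "insert"
      · subst h1
        simp only [String.reduceEq, reduceIte]
        match q with
        | [] => exact ih _ _ _ _ _ _ ⟨hnd, hne, hitems⟩
        | [x] => exact ih _ _ _ _ _ _ ⟨hnd, hne, hitems⟩
        | x :: y :: z :: r => exact ih _ _ _ _ _ _ ⟨hnd, hne, hitems⟩
        | [x, y] =>
          simp only
          refine ih _ _ _ _ _ _ ⟨PySem.Dict.nodup_keys_insert _ _ _ hnd,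
            PySem.Dict.nodup_keys_insert _ _ _ hne, ?_⟩
          have hcont : d.contains x = e.contains (x - ko) :=
            hmRel_contains ⟨hnd, hne, hitems⟩ x
          rcases hc : e.contains (x - ko) with _ | _
          · rw [PySem.Dict.items_insert_of_not_contains _ _ (by rw [hcont]; exact hc),
                PySem.Dict.items_insert_of_not_contains _ _ hc, List.map_append, hitems]
            simp
          · rw [PySem.Dict.items_insert_of_contains _ _ (by rw [hcont]; exact hc),
                PySem.Dict.items_insert_of_contains _ _ hc, hitems,
                List.map_map, List.map_map]
            apply List.map_congr_left
            intro p _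
            by_cases hp : p.1 = x - ko
            · have hpk : p.1 + ko = x := by omega
              simp [hp]
            · have hpk : ¬ (p.1 + ko = x) := by omega
              simp [hp, hpk]
      · by_cases h2 : t = "get"
        · subst h2
          simp only [String.reduceEq, reduceIte]
          match q with
          | [] => exact ih _ _ _ _ _ _ ⟨hnd, hne, hitems⟩
          | x :: r =>
            simp only
            have hcont : d.contains x = e.contains (x - ko) :=
              hmRel_contains ⟨hnd, hne, hitems⟩ x
            cases hge : e.get? (x - ko) with
            | some v =>
              have hcd : d.contains x = true := by
                rw [hcont, PySem.Dict.contains_eq_isSome_get?, hge]; rfl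
              have hgd : d.getD x 0 = v + vo := by
                rw [PySem.Dict.getD_eq_get?_getD, hmRel_get? ⟨hnd, hne, hitems⟩, hge]; rfl
              simp only [hcd, hgd, if_pos]
              have : s + (v + vo) = s + v + vo := by ring
              rw [← this] at *
              exact ih _ _ _ _ _ _ ⟨hnd, hne, hitems⟩
            | none =>
              have hcd : d.contains x = false := by
                rw [hcont, PySem.Dict.contains_eq_isSome_get?, hge]; rfl
              simp only [hcd, Bool.false_eq_true, if_false]
              exact ih _ _ _ _ _ _ ⟨hnd, hne, hitems⟩
        · by_cases h3 : t = "addToKey"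
          · subst h3
            simp only [String.reduceEq, reduceIte]
            match q with
            | [] => exact ih _ _ _ _ _ _ ⟨hnd, hne, hitems⟩
            | x :: r =>
              simp only
              have hit := rebuild_items_key d x hnd
              refine ih _ _ _ _ _ _ ⟨?_, hne, ?_⟩
              · exact nodup_of_items_map (fun k => k + x) (fun p => p.2)
                  (add_left_injective x) hit (by simpa [PySem.Dict.keys] using hnd)
              · rw [hit, hitems, List.map_map]
                apply List.map_congr_left
                intro p _
                simp [Function.comp]
                ring
          · by_cases h4 : t = "addToValue"
            · subst h4
              simp only [String.reduceEq, reduceIte]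
              match q with
              | [] => exact ih _ _ _ _ _ _ ⟨hnd, hne, hitems⟩
              | y :: r =>
                simp only
                have hit := rebuild_items_val d y hnd
                refine ih _ _ _ _ _ _ ⟨?_, hne, ?_⟩
                · exact nodup_of_items_map (fun k => k) (fun p => p.2 + y)
                    (fun a b hab => hab) hit (by simpa [PySem.Dict.keys] using hnd)
                · rw [hit, hitems, List.map_map]
                  apply List.map_congr_left
                  intro p _
                  simp [Function.comp]
                  ring
            · simp only [if_neg h1, if_neg h2, if_neg h3, if_neg h4]
              exact ih _ _ _ _ _ _ ⟨hnd, hne, hitems⟩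

-- ===== VERDICT (by name: the statement is the Claim_ definition above) =====
theorem hashMap_spec : Claim_equal_hashMap := by
  intro queryType query _ _
  unfold Spec_hashMap hashMap hashMap_alt
  exact hm_loop queryType query PySem.Dict.empty PySem.Dict.empty 0 0 0
    ⟨PySem.Dict.nodup_keys_empty, PySem.Dict.nodup_keys_empty, by simp⟩
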